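-- pv_equiv track=rewrite | github.com/bpnsingh/practice | scaler/2pointers/3 pointer.py | solve
-- ===== SOURCE A (Python) =====
-- def solve(A, B,C):
--     '''
--     Approach to get the min diffrence of a-b , a should be minimised and b should be maximised,
--     given input array is sorted, we can not get lesser value of a, so we will focus on to maximise b
--     by selecting minimum from triplets
--     '''
--     ans = 10 ** 6 #int_max value
--     P1=P2=P3 =0
--     while (P1<len(A) and P2 < len(B)) and P3<(len(C)):
--         max_3 = max(A[P1],B[P2],C[P3])
--         min_3 = min(A[P1],B[P2],C[P3])
--         temp = max_3 - min_3
--         ans = min(ans,temp)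
--         if min_3 == A[P1]:
--             P1+=1
--         elif min_3 == B[P2]:
--             P2+=1
--         else:
--             P3+=1
--     return ans
-- ===== SOURCE B (Python) =====
-- def solve(A, B, C):
--     # Consume the inputs from working copies instead of moving index pointers: reverse
--     # each list once so the current element is the tail, tag each current element with
--     # its source and pick the lexicographically smallest tagged pair to decide which
--     # list to pop, collect every window span, and reduce with a single min at the end
--     # (the 10**6 cap enters only in that final reduction).
--     spans = []
--     X, Y, Z = A[::-1], B[::-1], C[::-1]
--     while X and Y and Z:
--         lo, src = min((X[-1], 0), (Y[-1], 1), (Z[-1], 2))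
--         spans.append(max(X[-1], Y[-1], Z[-1]) - lo)
--         if src == 0:
--             X.pop()
--         elif src == 1:
--             Y.pop()
--         else:
--             Z.pop()
--     return min([10 ** 6] + spans)
-- ===== Notes on version B (the rewrite author's own statement) =====
-- stated objective: alternative
-- what changed: Same linear greedy strategy in a different decomposition: B consumes reversed working copies by popping instead of moving index pointers, picks the list to pop by a tagged lexicographic min instead of A's min/max chains with equality re-tests, and collects all window spans into a list reduced by one final min instead of threading a 10**6-initialized running accumulator through the loop.
import Mathlib
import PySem

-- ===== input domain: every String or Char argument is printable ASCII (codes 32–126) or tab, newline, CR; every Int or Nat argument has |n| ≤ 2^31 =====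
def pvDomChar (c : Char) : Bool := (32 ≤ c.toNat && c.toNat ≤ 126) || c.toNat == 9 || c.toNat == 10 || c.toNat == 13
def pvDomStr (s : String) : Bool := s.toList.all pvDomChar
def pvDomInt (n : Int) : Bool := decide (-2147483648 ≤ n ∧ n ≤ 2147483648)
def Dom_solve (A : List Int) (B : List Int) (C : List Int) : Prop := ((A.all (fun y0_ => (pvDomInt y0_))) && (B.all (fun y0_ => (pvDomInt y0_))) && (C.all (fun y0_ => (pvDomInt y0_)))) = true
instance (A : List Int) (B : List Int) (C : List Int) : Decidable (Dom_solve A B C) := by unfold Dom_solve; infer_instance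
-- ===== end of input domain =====

-- B keeps A's linear greedy strategy but in a different decomposition: it consumes
-- reversed working copies by popping (no index pointers), picks the list to pop by a
-- tagged lexicographic min (no min/max equality re-tests), and reduces the collected
-- spans by one final min instead of threading a running accumulator; equal to A on
-- every input.

-- ===== PORT A =====
-- the while loop of A: state (P1, P2, P3, ans); structural recursion on a fuel that
-- only guards totality (each iteration advances one pointer, so len A + len B + len C
-- iterations always suffice and the fuel-0 branch is never the one that returns)
def solveLoop (A : List Int) (B : List Int) (C : List Int) :
    Nat → Nat → Nat → Nat → Int → Int
  | 0, _, _, _, ans => ans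
  | fuel + 1, p1, p2, p3, ans =>
    if h : p1 < A.length ∧ p2 < B.length ∧ p3 < C.length then
      let a := A[p1]'h.1
      let b := B[p2]'h.2.1
      let c := C[p3]'h.2.2
      let max3 := max a (max b c)
      let min3 := min a (min b c)
      let temp := max3 - min3
      let ans' := min ans temp
      if min3 = a then solveLoop A B C fuel (p1+1) p2 p3 ans'
      else if min3 = b then solveLoop A B C fuel p1 (p2+1) p3 ans'
      else solveLoop A B C fuel p1 p2 (p3+1) ans'
    else ans

def solve (A : List Int) (B : List Int) (C : List Int) : Int :=
  solveLoop A B C (A.length + B.length + C.length) 0 0 0 (10 ^ 6)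

-- ===== PORT B =====
-- Python min of two tuples: keep the current one on a tie (lexicographic <)
def lexMin (p q : Int × Int) : Int × Int :=
  if q.1 < p.1 ∨ (q.1 = p.1 ∧ q.2 < p.2) then q else p

-- the while loop of Source B: state (X, Y, Z, spans); X[-1] = getLast, pop = dropLast;
-- same totality fuel
def altLoop : Nat → List Int → List Int → List Int → List Int → List Int
  | 0, _, _, _, spans => spans
  | fuel + 1, X, Y, Z, spans =>
    if h : X ≠ [] ∧ Y ≠ [] ∧ Z ≠ [] then
      let x := X.getLast h.1
      let y := Y.getLast h.2.1
      let z := Z.getLast h.2.2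
      let m := lexMin (lexMin (x, 0) (y, 1)) (z, 2)
      let spans' := spans ++ [max x (max y z) - m.1]
      if m.2 = 0 then altLoop fuel X.dropLast Y Z spans'
      else if m.2 = 1 then altLoop fuel X Y.dropLast Z spans'
      else altLoop fuel X Y Z.dropLast spans'
    else spans

def solve_alt (A : List Int) (B : List Int) (C : List Int) : Int :=
  List.foldl min (10 ^ 6)
    (altLoop (A.length + B.length + C.length) A.reverse B.reverse C.reverse [])

-- ===== PRECONDITION & SPEC =====
def Spec_solve (A : List Int) (B : List Int) (C : List Int) (out : Int) : Prop := out = solve_alt A B C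
instance (A : List Int) (B : List Int) (C : List Int) (out : Int) : Decidable (Spec_solve A B C out) := by unfold Spec_solve; infer_instance

-- ===== CLAIM (what is proved, stated in full; the proofs are below) =====
def Claim_equal_solve : Prop := ∀ (A : List Int) (B : List Int) (C : List Int), Dom_solve A B C → Spec_solve A B C (solve A B C)

-- ===== LEMMAS AND PROOFS =====

-- the spans accumulator only collects: the produced list is the accumulator plus the rest
theorem altLoop_acc :
    ∀ (fuel : Nat) (X Y Z spans : List Int),
      altLoop fuel X Y Z spans = spans ++ altLoop fuel X Y Z [] := by
  intro fuel
  induction fuel with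
  | zero => intro X Y Z spans; simp [altLoop]
  | succ n ih =>
      intro X Y Z spans
      by_cases h : X ≠ [] ∧ Y ≠ [] ∧ Z ≠ []
      · simp only [altLoop, dif_pos h]
        split_ifs with h1 h2
        · rw [ih X.dropLast Y Z (spans ++ _), ih X.dropLast Y Z ([] ++ _)]
          simp
        · rw [ih X Y.dropLast Z (spans ++ _), ih X Y.dropLast Z ([] ++ _)]
          simp
        · rw [ih X Y Z.dropLast (spans ++ _), ih X Y Z.dropLast ([] ++ _)]
          simp
      · simp [altLoop, dif_neg h]

-- the core simulation: A's pointer loop equals folding min over B's span list,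
-- for any common fuel and aligned state (pointers ↔ suffixes)
theorem loop_eq_fold (A B C : List Int) :
    ∀ (fuel p1 p2 p3 : Nat) (ans : Int),
      solveLoop A B C fuel p1 p2 p3 ans =
        List.foldl min ans
          (altLoop fuel (A.drop p1).reverse (B.drop p2).reverse (C.drop p3).reverse []) := by
  intro fuel
  induction fuel with
  | zero => intro p1 p2 p3 ans; simp [solveLoop, altLoop]
  | succ n ih =>
      intro p1 p2 p3 ans
      by_cases hcond : p1 < A.length ∧ p2 < B.length ∧ p3 < C.length
      · have hX : (A.drop p1).reverse = (A.drop (p1+1)).reverse ++ [A[p1]'hcond.1] := by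
          rw [List.drop_eq_getElem_cons hcond.1, List.reverse_cons]
        have hY : (B.drop p2).reverse = (B.drop (p2+1)).reverse ++ [B[p2]'hcond.2.1] := by
          rw [List.drop_eq_getElem_cons hcond.2.1, List.reverse_cons]
        have hZ : (C.drop p3).reverse = (C.drop (p3+1)).reverse ++ [C[p3]'hcond.2.2] := by
          rw [List.drop_eq_getElem_cons hcond.2.2, List.reverse_cons]
        rw [solveLoop]
        simp only [dif_pos hcond]
        rw [hX, hY, hZ]
        set a := A[p1]'hcond.1 with ha
        set b := B[p2]'hcond.2.1 with hb
        set c := C[p3]'hcond.2.2 with hc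
        have hne : (A.drop (p1+1)).reverse ++ [a] ≠ [] ∧
            (B.drop (p2+1)).reverse ++ [b] ≠ [] ∧ (C.drop (p3+1)).reverse ++ [c] ≠ [] := by
          refine ⟨?_, ?_, ?_⟩ <;> simp
        simp only [altLoop, dif_pos hne, List.getLast_concat, List.dropLast_concat, lexMin]
        by_cases hba : b < a
        · by_cases hcb : c < b
          · -- smallest head is c: A takes its third branch, B drops Z
            have e1 : ¬ (min a (min b c) = a) := by omega
            have e2 : ¬ (min a (min b c) = b) := by omega
            have emin : min a (min b c) = c := by omega
            simp only [if_pos (by omega : b < a ∨ (b = a ∧ (1 : Int) < 0)),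
              if_pos (by omega : c < b ∨ (c = b ∧ (2 : Int) < 1)),
              if_neg e1, if_neg e2]
            norm_num
            rw [altLoop_acc, List.foldl_append, ih p1 p2 (p3+1), emin, ← hX, ← hY]
            simp only [List.foldl_cons, List.foldl_nil]
          · -- smallest head is b: A takes its second branch, B drops Y
            have e1 : ¬ (min a (min b c) = a) := by omega
            have emin : min a (min b c) = b := by omega
            simp only [if_pos (by omega : b < a ∨ (b = a ∧ (1 : Int) < 0)),
              if_neg (by omega : ¬ (c < b ∨ (c = b ∧ (2 : Int) < 1))),
              if_neg e1, if_pos emin]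
            norm_num
            rw [altLoop_acc, List.foldl_append, ih p1 (p2+1) p3, emin, ← hX, ← hZ]
            simp only [List.foldl_cons, List.foldl_nil]
        · by_cases hca : c < a
          · -- smallest head is c: A takes its third branch, B drops Z
            have e1 : ¬ (min a (min b c) = a) := by omega
            have e2 : ¬ (min a (min b c) = b) := by omega
            have emin : min a (min b c) = c := by omega
            simp only [if_neg (by omega : ¬ (b < a ∨ (b = a ∧ (1 : Int) < 0))),
              if_pos (by omega : c < a ∨ (c = a ∧ (2 : Int) < 0)),
              if_neg e1, if_neg e2]
            norm_num
            rw [altLoop_acc, List.foldl_append, ih p1 p2 (p3+1), emin, ← hX, ← hY]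
            simp only [List.foldl_cons, List.foldl_nil]
          · -- smallest head is a: A takes its first branch, B drops X
            have emin : min a (min b c) = a := by omega
            simp only [if_neg (by omega : ¬ (b < a ∨ (b = a ∧ (1 : Int) < 0))),
              if_neg (by omega : ¬ (c < a ∨ (c = a ∧ (2 : Int) < 0))),
              if_pos emin]
            norm_num
            rw [altLoop_acc, List.foldl_append, ih (p1+1) p2 p3, emin, ← hY, ← hZ]
            simp only [List.foldl_cons, List.foldl_nil]
      · -- loop guard false ↔ some reversed working copy empty: both sides return ans
        rw [solveLoop]
        simp only [dif_neg hcond]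
        have hne : ¬((A.drop p1).reverse ≠ [] ∧ (B.drop p2).reverse ≠ [] ∧
            (C.drop p3).reverse ≠ []) := by
          simp only [ne_eq, List.reverse_eq_nil_iff, List.drop_eq_nil_iff]
          omega
        simp only [altLoop, dif_neg hne, List.foldl_nil]

-- ===== VERDICT (by name: the statement is the Claim_ definition above) =====
theorem solve_spec : Claim_equal_solve := by
  intro A B C _
  unfold Spec_solve solve solve_alt
  simpa using loop_eq_fold A B C (A.length + B.length + C.length) 0 0 0 (10 ^ 6)
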